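-- pv_equiv track=rewrite | github.com/MajoorWaldi/ComfyUI-Majoor-AssetManager | server/metadata/workflow_normalize.py | _sanitize_nonfinite_json
-- ===== SOURCE A (Python) =====
-- def _sanitize_nonfinite_json(text: str) -> str:
--     """
--     Replace bare NaN/Infinity tokens with null (only when outside JSON strings).
--     Some ComfyUI metadata blobs contain `NaN` (e.g. is_changed: NaN), which is invalid JSON.
--     """
--     if not isinstance(text, str) or not text:
--         return text
--
--     out = []
--     i = 0
--     in_str = False
--     escape = False
--     n = len(text)
--
--     while i < n:
--         ch = text[i]
--         if in_str:
--             out.append(ch)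
--             if escape:
--                 escape = False
--             elif ch == "\\":
--                 escape = True
--             elif ch == '"':
--                 in_str = False
--             i += 1
--             continue
--
--         if ch == '"':
--             in_str = True
--             out.append(ch)
--             i += 1
--             continue
--
--         if text.startswith("-Infinity", i):
--             out.append("null")
--             i += len("-Infinity")
--             continue
--         if text.startswith("Infinity", i):
--             out.append("null")
--             i += len("Infinity")
--             continue
--         if text.startswith("NaN", i):
--             out.append("null")
--             i += len("NaN")
--             continue
--
--         out.append(ch)
--         i += 1
--
--     return "".join(out)
-- ===== SOURCE B (Python) =====
-- import re
--
-- # One compiled pattern: a full JSON string literal (which may be unterminated,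
-- # including a trailing lone backslash) OR a bare non-finite token, longest first.
-- _NONFINITE = re.compile(
--     r'("(?:\\.|[^"\\])*(?:"|\\?\Z))|(-Infinity|Infinity|NaN)',
--     re.DOTALL,
-- )
--
-- def _sanitize_nonfinite_json(text: str) -> str:
--     if not isinstance(text, str) or not text:
--         return text
--     return _NONFINITE.sub(
--         lambda m: m.group(1) if m.group(1) is not None else "null",
--         text,
--     )
-- ===== Notes on version B (the rewrite author's own statement) =====
-- stated objective: faster
-- what changed: Replaced the hand-written index loop with in_str/escape flags by a single compiled re.sub pattern that alternates a full JSON string literal (kept verbatim, including unterminated ones and a trailing lone backslash) against the bare -Infinity/Infinity/NaN tokens (replaced by null) via a callback.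
import Mathlib
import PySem

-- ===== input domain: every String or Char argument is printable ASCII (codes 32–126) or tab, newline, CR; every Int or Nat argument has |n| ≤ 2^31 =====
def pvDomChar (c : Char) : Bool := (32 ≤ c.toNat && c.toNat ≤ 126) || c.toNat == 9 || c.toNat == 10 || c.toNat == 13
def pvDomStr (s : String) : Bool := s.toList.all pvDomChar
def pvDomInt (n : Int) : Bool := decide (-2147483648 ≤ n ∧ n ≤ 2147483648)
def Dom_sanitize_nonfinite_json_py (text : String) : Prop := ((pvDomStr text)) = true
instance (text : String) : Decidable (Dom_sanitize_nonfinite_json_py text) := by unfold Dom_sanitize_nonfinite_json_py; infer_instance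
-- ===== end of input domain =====

-- B replaces A's hand-written index/flag scanner by one compiled regex (string literal
-- alternated against the bare tokens) with a substitution callback; same O(n), measurably faster by a constant factor (engine loop in C).

-- ===== PORT A =====
-- A's while-loop over index i with flags in_str/escape, transcribed as structural
-- recursion over the remaining characters carrying the same two flags.
def pvGoA : List Char → Bool → Bool → List Char
  | [], _, _ => []
  | ch :: rest, true, esc =>
      ch :: (if esc then pvGoA rest true false
             else if ch = '\\' then pvGoA rest true true
             else if ch = '"' then pvGoA rest false false
             else pvGoA rest true false)
  | ch :: rest, false, _ =>
      if ch = '"' then ch :: pvGoA rest true false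
      else if ['-','I','n','f','i','n','i','t','y'].isPrefixOf (ch :: rest) then
        ['n','u','l','l'] ++ pvGoA ((ch :: rest).drop 9) false false
      else if ['I','n','f','i','n','i','t','y'].isPrefixOf (ch :: rest) then
        ['n','u','l','l'] ++ pvGoA ((ch :: rest).drop 8) false false
      else if ['N','a','N'].isPrefixOf (ch :: rest) then
        ['n','u','l','l'] ++ pvGoA ((ch :: rest).drop 3) false false
      else ch :: pvGoA rest false false
  termination_by cs _ _ => cs.length
  decreasing_by all_goals simp [List.length_drop]

def sanitize_nonfinite_json_py (text : String) : String :=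
  if text = "" then text else String.ofList (pvGoA text.toList false false)

-- ===== PORT B =====
-- B's regex ("(?:\\.|[^"\\])*(?:"|\?\Z)) | (-Infinity|Infinity|NaN), applied by re.sub:
-- the engine's left-to-right scan is transcribed as pvGoB (outside a string literal:
-- try the token alternation via pvTok, like the callback returning "null") mutually
-- recursive with pvInStr (the string-literal sub-pattern: \\. pairs, [^"\\], closing
-- quote or end of input, possibly after a lone trailing backslash).
def pvTok (cs : List Char) : Option Nat :=
  if ['-','I','n','f','i','n','i','t','y'].isPrefixOf cs then some 9
  else if ['I','n','f','i','n','i','t','y'].isPrefixOf cs then some 8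
  else if ['N','a','N'].isPrefixOf cs then some 3
  else none

mutual
def pvGoB : List Char → List Char
  | [] => []
  | ch :: rest =>
      if ch = '"' then ch :: pvInStr rest
      else
        match pvTok (ch :: rest) with
        | some k => ['n','u','l','l'] ++ pvGoB (rest.drop (k - 1))  -- drop k chars of ch::rest, k ≥ 1
        | none => ch :: pvGoB rest
  termination_by cs => cs.length
  decreasing_by all_goals simp [List.length_drop]

def pvInStr : List Char → List Char
  | [] => []
  | ch :: rest =>
      if ch = '\\' then
        match rest with
        | [] => [ch]
        | c :: r => ch :: c :: pvInStr r
      else if ch = '"' then ch :: pvGoB rest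
      else ch :: pvInStr rest
  termination_by cs => cs.length
  decreasing_by all_goals simp
end

def sanitize_nonfinite_json_py_alt (text : String) : String :=
  if text = "" then text else String.ofList (pvGoB text.toList)

-- ===== PRECONDITION & SPEC =====
def Spec_sanitize_nonfinite_json_py (text : String) (out : String) : Prop := out = sanitize_nonfinite_json_py_alt text
instance (text : String) (out : String) : Decidable (Spec_sanitize_nonfinite_json_py text out) := by unfold Spec_sanitize_nonfinite_json_py; infer_instance

-- ===== CLAIM (what is proved, stated in full; the proofs are below) =====
def Claim_equal_sanitize_nonfinite_json_py : Prop := ∀ (text : String), Dom_sanitize_nonfinite_json_py text → Spec_sanitize_nonfinite_json_py text (sanitize_nonfinite_json_py text)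

-- ===== LEMMAS AND PROOFS =====

-- Loop invariant: A's flag states correspond to B's two scanners —
-- (false,false) ↔ pvGoB, (true,false) ↔ pvInStr, and (true,true) is
-- "emit one char unconditionally, then back to pvInStr".
theorem pv_key : ∀ n (cs : List Char), cs.length ≤ n →
    pvGoA cs false false = pvGoB cs ∧
    pvGoA cs true false = pvInStr cs ∧
    pvGoA cs true true = (match cs with | [] => [] | c :: r => c :: pvInStr r) := by
  intro n
  induction n with
  | zero =>
    intro cs h
    have : cs = [] := List.eq_nil_of_length_eq_zero (Nat.le_zero.mp h)
    subst this
    refine ⟨by simp [pvGoA, pvGoB], by simp [pvGoA, pvInStr], by simp [pvGoA]⟩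
  | succ n ih =>
    intro cs h
    match cs with
    | [] => exact ⟨by simp [pvGoA, pvGoB], by simp [pvGoA, pvInStr], by simp [pvGoA]⟩
    | ch :: rest =>
      have hr : rest.length ≤ n := by simpa using Nat.lt_succ_iff.mp (Nat.lt_of_lt_of_le (by simp) h)
      refine ⟨?_, ?_, ?_⟩
      · -- outside-string case
        rw [pvGoA.eq_def, pvGoB.eq_def]
        by_cases hq : ch = '"'
        · simp [hq, (ih rest hr).2.1]
        · simp only [hq, if_false]
          unfold pvTok
          split_ifs with h9 h8 h3
          · have := ih (rest.drop 8) (by simp [List.length_drop]; omega)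
            simp [this.1]
          · have := ih (rest.drop 7) (by simp [List.length_drop]; omega)
            simp [this.1]
          · have := ih (rest.drop 2) (by simp [List.length_drop]; omega)
            simp [this.1]
          · simp [(ih rest hr).1]
      · -- in-string, no pending escape
        rw [pvGoA.eq_def, pvInStr.eq_def]
        by_cases hb : ch = '\\'
        · subst hb
          simp only [if_true]
          match rest with
          | [] => simp [pvGoA]
          | c :: r =>
            have hrr : r.length ≤ n := by simp at hr ⊢; omega
            simp [(ih (c :: r) hr).2.2]
        · by_cases hq : ch = '"'
          · simp [hq, (ih rest hr).1]
          · simp [hb, hq, (ih rest hr).2.1]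
      · -- in-string, pending escape: consume one char then continue unescaped
        rw [pvGoA.eq_def]
        simp [(ih rest hr).2.1]

-- ===== VERDICT (by name: the statement is the Claim_ definition above) =====
theorem sanitize_nonfinite_json_py_spec : Claim_equal_sanitize_nonfinite_json_py := by
  intro text _
  unfold Spec_sanitize_nonfinite_json_py sanitize_nonfinite_json_py sanitize_nonfinite_json_py_alt
  split_ifs
  · rfl
  · exact congrArg String.ofList (pv_key text.toList.length text.toList le_rfl).1
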